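-- pv_equiv track=rewrite | github.com/GenLogs/mockylla | mockylla/parser/create.py | _parse_clustering_order
-- ===== SOURCE A (Python) =====
-- def _split_top_level(value):
--     """Split a comma separated string while respecting nested parentheses."""
--
--     parts = []
--     current = ""
--     depth = 0
--
--     for char in value:
--         if char == "(":
--             depth += 1
--         elif char == ")":
--             depth -= 1
--         elif char == "," and depth == 0:
--             parts.append(current.strip())
--             current = ""
--             continue
--         current += char
--
--     parts.append(current.strip())
--     return [part for part in parts if part]
--
-- def _parse_clustering_order(order_clause):
--     """Parse CLUSTERING ORDER BY clause content into a mapping."""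
--
--     orders = {}
--     for token in _split_top_level(order_clause):
--         if not token:
--             continue
--         pieces = token.strip().split()
--         column = pieces[0]
--         direction = pieces[1].upper() if len(pieces) > 1 else "ASC"
--         orders[column] = direction
--     return orders
-- ===== SOURCE B (Python) =====
-- def _split_first(s):
--     """Return (text before the first top-level comma, remainder after it or None)."""
--     depth = 0
--     for i, ch in enumerate(s):
--         if ch == "(":
--             depth += 1
--         elif ch == ")":
--             depth -= 1
--         elif ch == "," and depth == 0:
--             return s[:i], s[i + 1:]
--     return s, None
--
--
-- def _parse_clustering_order(order_clause):
--     """Parse CLUSTERING ORDER BY clause content into a mapping."""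
--
--     orders = {}
--     rest = order_clause
--     while True:
--         seg, rest = _split_first(rest)
--         words = seg.split()
--         if words:
--             orders[words[0]] = words[1].upper() if len(words) > 1 else "ASC"
--         if rest is None:
--             return orders
-- ===== Notes on version B (the rewrite author's own statement) =====
-- stated objective: alternative
-- what changed: Replaces A's three-phase pipeline (a fold building a list of stripped parts, a nonempty filter, then a token loop that re-strips and splits each part) with a recursive descent that peels off the text before the first top-level comma and writes each segment's split() words straight into the dict, letting split() subsume the strip and the empty-segment filter.
import Mathlib
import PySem

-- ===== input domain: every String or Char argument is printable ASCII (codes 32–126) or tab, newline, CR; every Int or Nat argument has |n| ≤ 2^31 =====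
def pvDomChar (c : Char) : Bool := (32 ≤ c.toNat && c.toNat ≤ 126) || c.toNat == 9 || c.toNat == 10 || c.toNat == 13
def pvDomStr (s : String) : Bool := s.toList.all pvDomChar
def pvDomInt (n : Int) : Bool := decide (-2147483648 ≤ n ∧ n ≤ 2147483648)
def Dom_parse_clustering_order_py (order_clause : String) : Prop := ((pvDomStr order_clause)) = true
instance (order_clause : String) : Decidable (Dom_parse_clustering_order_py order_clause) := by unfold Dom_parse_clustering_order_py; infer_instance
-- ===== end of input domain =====

-- B fuses A's split/strip/filter/re-split pipeline into one recursive descent on the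
-- first top-level comma; same cost, plainer per-segment handling (return value only).

-- ===== PORT A =====

-- one step of _split_top_level's character loop: state (parts, current, depth)
def pvStepA (st : List (List Char) × List Char × Int) (c : Char) :
    List (List Char) × List Char × Int :=
  if c = '(' then (st.1, st.2.1 ++ [c], st.2.2 + 1)
  else if c = ')' then (st.1, st.2.1 ++ [c], st.2.2 - 1)
  else if c = ',' ∧ st.2.2 = 0 then (st.1 ++ [PySem.Chars.strip st.2.1], [], st.2.2)
  else (st.1, st.2.1 ++ [c], st.2.2)

-- _split_top_level, on List Char
def pvSplitTopLevel (value : List Char) : List (List Char) :=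
  let st := value.foldl pvStepA ([], [], 0)
  (st.1 ++ [PySem.Chars.strip st.2.1]).filter (fun p => !p.isEmpty)

def parse_clustering_order_py (order_clause : String) : List (String × String) :=
  let orders := (pvSplitTopLevel order_clause.toList).foldl
    (fun (orders : PySem.Dict (List Char) (List Char)) token =>
      if token.isEmpty then orders
      else
        let pieces := PySem.Chars.split₀ (PySem.Chars.strip token)
        -- pieces[0]: never raises here (token is a nonempty stripped string), ported via headD
        let column := pieces.headD []
        let direction := if 1 < pieces.length then PySem.Chars.upper (pieces.getD 1 []) else ['A', 'S', 'C']
        orders.insert column direction)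
    PySem.Dict.empty
  orders.items.map (fun p => (String.ofList p.1, String.ofList p.2))

-- ===== PORT B =====

-- _split_first: (text before the first depth-0 comma, remainder after it or none)
def pvSplitFirst (depth : Int) (s : List Char) : List Char × Option (List Char) :=
  match s with
  | [] => ([], none)
  | c :: rest =>
    if c = '(' then let pr := pvSplitFirst (depth + 1) rest; (c :: pr.1, pr.2)
    else if c = ')' then let pr := pvSplitFirst (depth - 1) rest; (c :: pr.1, pr.2)
    else if c = ',' ∧ depth = 0 then ([], some rest)
    else let pr := pvSplitFirst depth rest; (c :: pr.1, pr.2)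

-- the remainder is a strict suffix: needed by pvGoB's termination
theorem pvSplitFirst_some_length (d : Int) (s : List Char) (rest : List Char)
    (h : (pvSplitFirst d s).2 = some rest) : rest.length < s.length := by
  induction s generalizing d with
  | nil => simp [pvSplitFirst] at h
  | cons c tl ih =>
    simp only [pvSplitFirst] at h
    split_ifs at h with h1 h2 h3
    · exact Nat.lt_trans (ih _ h) (by simp)
    · exact Nat.lt_trans (ih _ h) (by simp)
    · cases h; simp
    · exact Nat.lt_trans (ih _ h) (by simp)

-- B's loop body: words = seg.split(); if words: orders[words[0]] = words[1].upper() if len(words) > 1 else "ASC"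
def pvStepB (orders : PySem.Dict (List Char) (List Char)) (seg : List Char) :
    PySem.Dict (List Char) (List Char) :=
  match PySem.Chars.split₀ seg with
  | [] => orders
  | w :: ws =>
    orders.insert w (match ws with | [] => ['A', 'S', 'C'] | w2 :: _ => PySem.Chars.upper w2)

-- B's while loop: process the segment before the first top-level comma, continue on the rest
def pvGoB (s : List Char) (orders : PySem.Dict (List Char) (List Char)) :
    PySem.Dict (List Char) (List Char) :=
  match h : (pvSplitFirst 0 s).2 with
  | none => pvStepB orders (pvSplitFirst 0 s).1
  | some rest => pvGoB rest (pvStepB orders (pvSplitFirst 0 s).1)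
termination_by s.length
decreasing_by exact pvSplitFirst_some_length 0 s rest h

def parse_clustering_order_py_alt (order_clause : String) : List (String × String) :=
  (pvGoB order_clause.toList PySem.Dict.empty).items.map
    (fun p => (String.ofList p.1, String.ofList p.2))

-- ===== PRECONDITION & SPEC =====
def Spec_parse_clustering_order_py (order_clause : String) (out : List (String × String)) : Prop := out = parse_clustering_order_py_alt order_clause
instance (order_clause : String) (out : List (String × String)) : Decidable (Spec_parse_clustering_order_py order_clause out) := by unfold Spec_parse_clustering_order_py; infer_instance

-- ===== CLAIM (what is proved, stated in full; the proofs are below) =====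
def Claim_equal_parse_clustering_order_py : Prop := ∀ (order_clause : String), Dom_parse_clustering_order_py order_clause → Spec_parse_clustering_order_py order_clause (parse_clustering_order_py order_clause)

-- ===== LEMMAS AND PROOFS =====

-- head/tail of the raw (unstripped) top-level segments of s, starting at depth d
def pvSegsHT (d : Int) (s : List Char) : List Char × List (List Char) :=
  ((pvSplitFirst d s).1,
   match h : (pvSplitFirst d s).2 with
   | none => []
   | some rest => (pvSegsHT 0 rest).1 :: (pvSegsHT 0 rest).2)
termination_by s.length
decreasing_by all_goals exact pvSplitFirst_some_length d s rest h

theorem pvSegsHT_eq (d : Int) (s : List Char) :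
    pvSegsHT d s = ((pvSplitFirst d s).1,
      match (pvSplitFirst d s).2 with
      | none => []
      | some rest => (pvSegsHT 0 rest).1 :: (pvSegsHT 0 rest).2) := by
  conv_lhs => rw [pvSegsHT]
  cases hq : (pvSplitFirst d s).2 <;> simp [hq]

-- ---- split₀ facts ----

theorem pvGoWs (t : List Char) (ht : ∀ c ∈ t, PySem.Chars.isspace c) :
    ∀ cur acc, PySem.Chars.split₀.go t cur acc = PySem.Chars.split₀.go [] cur acc := by
  induction t with
  | nil => intro cur acc; rfl
  | cons c rest ih =>
    intro cur acc
    have hc : PySem.Chars.isspace c := ht c (by simp)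
    have ht' : ∀ x ∈ rest, PySem.Chars.isspace x := fun x hx => ht x (by simp [hx])
    by_cases hcur : cur.isEmpty
    · simp only [PySem.Chars.split₀.go, hc, if_pos, hcur]
      rw [ih ht' [] acc]
      have : cur = [] := by simpa using hcur
      subst this
      rfl
    · simp only [PySem.Chars.split₀.go, hc, hcur, if_true, if_false, Bool.false_eq_true]
      rw [ih ht' [] (cur.reverse :: acc)]
      rfl

theorem pvGoAppendWs (t : List Char) (ht : ∀ c ∈ t, PySem.Chars.isspace c) :
    ∀ s cur acc, PySem.Chars.split₀.go (s ++ t) cur acc = PySem.Chars.split₀.go s cur acc := by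
  intro s
  induction s with
  | nil => intro cur acc; simpa using pvGoWs t ht cur acc
  | cons c rest ih =>
    intro cur acc
    simp only [List.cons_append, PySem.Chars.split₀.go]
    split_ifs <;> apply ih

theorem pvGoLstrip (s : List Char) :
    ∀ acc, PySem.Chars.split₀.go (List.dropWhile PySem.Chars.isspace s) [] acc
      = PySem.Chars.split₀.go s [] acc := by
  induction s with
  | nil => intro acc; rfl
  | cons c rest ih =>
    intro acc
    by_cases hc : PySem.Chars.isspace c
    · rw [List.dropWhile_cons, if_pos hc, ih]
      simp [PySem.Chars.split₀.go, hc]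
    · rw [List.dropWhile_cons, if_neg hc]

-- every list is its rstrip followed by a whitespace tail
theorem pvRstrip_decomp (u : List Char) :
    u = PySem.Chars.rstrip u ++ (List.takeWhile PySem.Chars.isspace u.reverse).reverse := by
  unfold PySem.Chars.rstrip
  rw [← List.reverse_append, List.takeWhile_append_dropWhile, List.reverse_reverse]

-- L1: split() ignores leading/trailing whitespace
theorem pvSplit_strip (s : List Char) :
    PySem.Chars.split₀ (PySem.Chars.strip s) = PySem.Chars.split₀ s := by
  unfold PySem.Chars.split₀ PySem.Chars.strip
  have htail : ∀ c ∈ (List.takeWhile PySem.Chars.isspace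
      (PySem.Chars.lstrip s).reverse).reverse, PySem.Chars.isspace c := by
    intro c hc
    rw [List.mem_reverse] at hc
    exact List.mem_takeWhile_imp hc
  have h1 : PySem.Chars.split₀.go (PySem.Chars.rstrip (PySem.Chars.lstrip s)) [] []
      = PySem.Chars.split₀.go (PySem.Chars.lstrip s) [] [] := by
    conv_rhs => rw [pvRstrip_decomp (PySem.Chars.lstrip s)]
    exact (pvGoAppendWs _ htail _ [] []).symm
  rw [h1]
  unfold PySem.Chars.lstrip
  exact pvGoLstrip s []

theorem pvGoEqNil (s : List Char) :
    ∀ cur acc, PySem.Chars.split₀.go s cur acc = [] ↔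
      ((∀ c ∈ s, PySem.Chars.isspace c) ∧ cur = [] ∧ acc = []) := by
  induction s with
  | nil =>
    intro cur acc
    cases cur with
    | nil => simp [PySem.Chars.split₀.go]
    | cons a as => simp [PySem.Chars.split₀.go]
  | cons c rest ih =>
    intro cur acc
    by_cases hc : PySem.Chars.isspace c
    · cases cur with
      | nil => simp [PySem.Chars.split₀.go, hc, ih]
      | cons a as => simp [PySem.Chars.split₀.go, hc, ih]
    · simp [PySem.Chars.split₀.go, hc, ih]

-- L2: the segment strips to empty iff split() is empty
theorem pvStrip_nil_iff_split_nil (s : List Char) :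
    PySem.Chars.strip s = [] ↔ PySem.Chars.split₀ s = [] := by
  have hsplit : PySem.Chars.split₀ s = [] ↔ ∀ c ∈ s, PySem.Chars.isspace c := by
    unfold PySem.Chars.split₀
    rw [pvGoEqNil]
    simp
  rw [hsplit]
  constructor
  · intro h
    unfold PySem.Chars.strip PySem.Chars.rstrip PySem.Chars.lstrip at h
    rw [List.reverse_eq_nil_iff, List.dropWhile_eq_nil_iff] at h
    have hnil : List.dropWhile PySem.Chars.isspace s = [] := by
      by_contra hne
      have hhead := List.head_dropWhile_not PySem.Chars.isspace hne
      have hmem : (List.dropWhile PySem.Chars.isspace s).head hne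
          ∈ (List.dropWhile PySem.Chars.isspace s).reverse := by
        rw [List.mem_reverse]
        exact List.head_mem hne
      have := h _ hmem
      rw [hhead] at this
      exact Bool.false_ne_true this
    rw [List.dropWhile_eq_nil_iff] at hnil
    exact hnil
  · intro h
    have hl : List.dropWhile PySem.Chars.isspace s = [] := List.dropWhile_eq_nil_iff.mpr h
    unfold PySem.Chars.strip PySem.Chars.lstrip
    rw [hl]
    rfl

-- ---- A's fold in terms of pvSegsHT ----

theorem pvFoldA_eq (xs : List Char) : ∀ (parts : List (List Char)) (cur : List Char) (d : Int),
    (xs.foldl pvStepA (parts, cur, d)).1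
        ++ [PySem.Chars.strip (xs.foldl pvStepA (parts, cur, d)).2.1]
      = parts ++ PySem.Chars.strip (cur ++ (pvSegsHT d xs).1)
          :: ((pvSegsHT d xs).2.map PySem.Chars.strip) := by
  induction xs with
  | nil =>
    intro parts cur d
    simp [pvSegsHT, pvSplitFirst]
  | cons c rest ih =>
    intro parts cur d
    rw [List.foldl_cons]
    by_cases h1 : c = '('
    · rw [show pvStepA (parts, cur, d) c = (parts, cur ++ [c], d + 1) from by
        simp [pvStepA, h1]]
      rw [ih parts (cur ++ [c]) (d + 1)]
      have hsf : pvSplitFirst d (c :: rest)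
          = (c :: (pvSplitFirst (d + 1) rest).1, (pvSplitFirst (d + 1) rest).2) := by
        simp [pvSplitFirst, h1]
      have hseg : pvSegsHT d (c :: rest)
          = (c :: (pvSegsHT (d + 1) rest).1, (pvSegsHT (d + 1) rest).2) := by
        rw [pvSegsHT_eq d (c :: rest), pvSegsHT_eq (d + 1) rest, hsf]
      rw [hseg]
      simp [List.append_assoc]
    · by_cases h2 : c = ')'
      · rw [show pvStepA (parts, cur, d) c = (parts, cur ++ [c], d - 1) from by
          simp [pvStepA, h1, h2]]
        rw [ih parts (cur ++ [c]) (d - 1)]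
        have hsf : pvSplitFirst d (c :: rest)
            = (c :: (pvSplitFirst (d - 1) rest).1, (pvSplitFirst (d - 1) rest).2) := by
          simp [pvSplitFirst, h1, h2]
        have hseg : pvSegsHT d (c :: rest)
            = (c :: (pvSegsHT (d - 1) rest).1, (pvSegsHT (d - 1) rest).2) := by
          rw [pvSegsHT_eq d (c :: rest), pvSegsHT_eq (d - 1) rest, hsf]
        rw [hseg]
        simp [List.append_assoc]
      · by_cases h3 : c = ',' ∧ d = 0
        · obtain ⟨hc, hd⟩ := h3
          subst hd
          rw [show pvStepA (parts, cur, 0) c = (parts ++ [PySem.Chars.strip cur], [], 0) from by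
            simp [pvStepA, hc]]
          rw [ih (parts ++ [PySem.Chars.strip cur]) [] 0]
          have hsf : pvSplitFirst 0 (c :: rest) = ([], some rest) := by
            simp [pvSplitFirst, hc]
          have hseg : pvSegsHT 0 (c :: rest)
              = ([], (pvSegsHT 0 rest).1 :: (pvSegsHT 0 rest).2) := by
            rw [pvSegsHT_eq 0 (c :: rest), hsf]
          rw [hseg]
          simp
        · rw [show pvStepA (parts, cur, d) c = (parts, cur ++ [c], d) from by
            simp [pvStepA, h1, h2, h3]]
          rw [ih parts (cur ++ [c]) d]
          have hsf : pvSplitFirst d (c :: rest)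
              = (c :: (pvSplitFirst d rest).1, (pvSplitFirst d rest).2) := by
            simp [pvSplitFirst, h1, h2, h3]
          have hseg : pvSegsHT d (c :: rest)
              = (c :: (pvSegsHT d rest).1, (pvSegsHT d rest).2) := by
            rw [pvSegsHT_eq d (c :: rest), pvSegsHT_eq d rest, hsf]
          rw [hseg]
          simp [List.append_assoc]

-- ---- B's loop in terms of pvSegsHT ----

theorem pvGoB_eq (xs : List Char) (orders : PySem.Dict (List Char) (List Char)) :
    pvGoB xs orders = ((pvSegsHT 0 xs).1 :: (pvSegsHT 0 xs).2).foldl pvStepB orders := by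
  induction hL : xs.length using Nat.strong_induction_on generalizing xs orders with
  | _ n ihn =>
  subst hL
  rw [pvGoB, pvSegsHT_eq]
  cases hq : (pvSplitFirst 0 xs).2 with
  | none => simp [hq]
  | some rest =>
    simp only [hq]
    rw [ihn rest.length (pvSplitFirst_some_length 0 xs rest hq) rest _ rfl]
    simp

-- the dict both programs build, char-level
theorem pvDict_eq (xs : List Char) :
    (pvSplitTopLevel xs).foldl
      (fun (orders : PySem.Dict (List Char) (List Char)) token =>
        if token.isEmpty then orders
        else
          let pieces := PySem.Chars.split₀ (PySem.Chars.strip token)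
          let column := pieces.headD []
          let direction := if 1 < pieces.length then PySem.Chars.upper (pieces.getD 1 [])
            else ['A', 'S', 'C']
          orders.insert column direction)
      PySem.Dict.empty
    = pvGoB xs PySem.Dict.empty := by
  rw [pvGoB_eq]
  have hsplit : pvSplitTopLevel xs
      = (((pvSegsHT 0 xs).1 :: (pvSegsHT 0 xs).2).map PySem.Chars.strip).filter
          (fun p => !p.isEmpty) := by
    unfold pvSplitTopLevel
    have h := pvFoldA_eq xs [] [] 0
    simp only [List.nil_append] at h
    simp only [h, List.map_cons]
  rw [hsplit, List.foldl_filter, List.foldl_map]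
  congr 1
  funext o seg
  cases hsp : PySem.Chars.split₀ seg with
  | nil =>
    have hst : PySem.Chars.strip seg = [] := (pvStrip_nil_iff_split_nil seg).mpr hsp
    simp [pvStepB, hsp, hst]
  | cons w ws =>
    have hst : ¬ PySem.Chars.strip seg = [] := by
      rw [pvStrip_nil_iff_split_nil seg, hsp]
      simp
    have hpieces : PySem.Chars.split₀ (PySem.Chars.strip (PySem.Chars.strip seg)) = w :: ws := by
      rw [pvSplit_strip, pvSplit_strip, hsp]
    simp only [pvStepB, hsp]
    rw [if_pos (by simpa using hst)]
    rw [if_neg (by simpa using hst)]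
    simp only [hpieces]
    cases ws with
    | nil => simp
    | cons w2 t => simp

-- ===== VERDICT (by name: the statement is the Claim_ definition above) =====
theorem parse_clustering_order_py_spec : Claim_equal_parse_clustering_order_py := by
  intro s _
  show _ = _
  unfold parse_clustering_order_py parse_clustering_order_py_alt
  rw [pvDict_eq s.toList]
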